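-- pv_equiv track=rewrite | github.com/KleinerBaum/cognitivestaffing | ingest/heuristics.py | _paragraphs_with_indices
-- ===== SOURCE A (Python) =====
-- from typing import Dict, List, Mapping, MutableMapping, Optional, Sequence, Set, Tuple
--
-- def _paragraphs_with_indices(lines: Sequence[str]) -> list[list[tuple[int, str]]]:
--     """Return paragraphs retaining the original line indices."""
--
--     paragraphs: list[list[tuple[int, str]]] = []
--     current: list[tuple[int, str]] = []
--     for idx, line in enumerate(lines):
--         if line.strip():
--             current.append((idx, line))
--         elif current:
--             paragraphs.append(current)
--             current = []
--     if current:
--         paragraphs.append(current)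
--     return paragraphs
-- ===== SOURCE B (Python) =====
-- from typing import Sequence
--
--
-- def _split_consecutive(kept: list[tuple[int, str]]) -> list[list[tuple[int, str]]]:
--     """Split an index-tagged list into maximal runs of consecutive indices."""
--     runs: list[list[tuple[int, str]]] = []
--     pos = 0
--     n = len(kept)
--     while pos < n:
--         end = pos + 1
--         while end < n and kept[end][0] == kept[end - 1][0] + 1:
--             end += 1
--         runs.append(kept[pos:end])
--         pos = end
--     return runs
--
--
-- def _paragraphs_with_indices(lines: Sequence[str]) -> list[list[tuple[int, str]]]:
--     """Return paragraphs retaining the original line indices.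
--
--     Two stages: drop blank lines first (keeping indices), then cut the
--     filtered list wherever the indices are not consecutive."""
--     kept = [(i, line) for i, line in enumerate(lines) if line.strip()]
--     return _split_consecutive(kept)
-- ===== Notes on version B (the rewrite author's own statement) =====
-- stated objective: alternative
-- what changed: Instead of A's one-pass state machine that buffers the current paragraph and flushes it at blank lines, B first filters out blank lines into an index-tagged list and then splits that list into maximal runs of consecutive indices (gap detection by index arithmetic).
import Mathlib
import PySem

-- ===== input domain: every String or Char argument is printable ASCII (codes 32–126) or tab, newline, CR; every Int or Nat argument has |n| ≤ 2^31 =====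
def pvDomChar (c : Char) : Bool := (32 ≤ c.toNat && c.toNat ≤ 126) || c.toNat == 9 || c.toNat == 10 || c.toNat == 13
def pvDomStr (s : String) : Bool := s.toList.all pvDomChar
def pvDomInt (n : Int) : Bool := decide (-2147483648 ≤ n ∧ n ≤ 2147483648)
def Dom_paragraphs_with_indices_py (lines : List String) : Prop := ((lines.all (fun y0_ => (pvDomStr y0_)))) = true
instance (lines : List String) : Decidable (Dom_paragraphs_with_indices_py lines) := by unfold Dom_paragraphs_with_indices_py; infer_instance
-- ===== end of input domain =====

-- B replaces A's one-pass blank-triggered flush state machine by two stages: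
-- filter out blank lines keeping indices, then split the filtered list into
-- maximal runs of consecutive indices (alternative decomposition; same cost).

-- ===== PORT A =====
-- `if line.strip():` — truthy iff the stripped string is nonempty
def pvNonblank (p : Int × String) : Bool := PySem.Str.strip p.2 ≠ ""

-- the for-loop, state = (paragraphs, current)
def pvLoopA (st : List (List (Int × String)) × List (Int × String)) (p : Int × String) :
    List (List (Int × String)) × List (Int × String) :=
  if pvNonblank p then (st.1, st.2 ++ [p])
  else if st.2 ≠ [] then (st.1 ++ [st.2], []) else st

def paragraphs_with_indices_py (lines : List String) : List (List (Int × String)) :=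
  let st := (PySem.List.enumerate lines).foldl pvLoopA ([], [])
  if st.2 ≠ [] then st.1 ++ [st.2] else st.1

-- ===== PORT B =====
-- inner while loop of _split_consecutive: extend `end` while kept[end][0] == kept[end-1][0] + 1;
-- recursion over the suffix, carrying the previous index; returns (run taken, remainder)
def pvTakeRun (i : Int) : List (Int × String) → List (Int × String) × List (Int × String)
  | [] => ([], [])
  | q :: rest =>
    if q.1 = i + 1 then
      let ab := pvTakeRun q.1 rest
      (q :: ab.1, ab.2)
    else ([], q :: rest)

theorem pvTakeRun_snd_length (i : Int) (l : List (Int × String)) :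
    (pvTakeRun i l).2.length ≤ l.length := by
  induction l generalizing i with
  | nil => simp [pvTakeRun]
  | cons q rest ih =>
    rw [pvTakeRun]
    split
    · exact Nat.le_succ_of_le (ih q.1)
    · simp

-- outer while loop of _split_consecutive: take one run, recurse on the remainder
def pvSplit : List (Int × String) → List (List (Int × String))
  | [] => []
  | p :: rest =>
    let ab := pvTakeRun p.1 rest
    (p :: ab.1) :: pvSplit ab.2
  termination_by l => l.length
  decreasing_by
    simp only [List.length_cons]
    exact Nat.lt_succ_of_le (pvTakeRun_snd_length _ _)

-- kept = [(i, line) for i, line in enumerate(lines) if line.strip()]; then split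
def paragraphs_with_indices_py_alt (lines : List String) : List (List (Int × String)) :=
  pvSplit ((PySem.List.enumerate lines).filter pvNonblank)

-- ===== PRECONDITION & SPEC =====
def Spec_paragraphs_with_indices_py (lines : List String) (out : List (List (Int × String))) : Prop := out = paragraphs_with_indices_py_alt lines
instance (lines : List String) (out : List (List (Int × String))) : Decidable (Spec_paragraphs_with_indices_py lines out) := by unfold Spec_paragraphs_with_indices_py; infer_instance

-- ===== CLAIM (what is proved, stated in full; the proofs are below) =====
def Claim_equal_paragraphs_with_indices_py : Prop := ∀ (lines : List String), Dom_paragraphs_with_indices_py lines → Spec_paragraphs_with_indices_py lines (paragraphs_with_indices_py lines)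

-- ===== LEMMAS AND PROOFS =====

-- ---- A-side: A's loop + final flush equals a run-grouping recursion pvGroups ----

-- A's loop followed by the final flush, as one recursion with the `current` accumulator explicit.
def pvRun (cur : List (Int × String)) : List (Int × String) → List (List (Int × String))
  | [] => if cur ≠ [] then [cur] else []
  | p :: rest =>
    if pvNonblank p then pvRun (cur ++ [p]) rest
    else if cur ≠ [] then cur :: pvRun [] rest else pvRun [] rest

-- maximal nonblank runs of a pair list (intermediate characterisation of A)
def pvGroups : List (Int × String) → List (List (Int × String))
  | [] => []
  | p :: rest =>
    if pvNonblank p then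
      (p :: rest.takeWhile pvNonblank) :: pvGroups (rest.dropWhile pvNonblank)
    else
      pvGroups rest
  termination_by l => l.length
  decreasing_by
    · simp only [List.length_cons]
      exact Nat.lt_succ_of_le (List.length_dropWhile_le _ _)
    · simp

theorem pvRun_eq_foldl (pairs : List (Int × String)) :
    ∀ ps cur, (if ((pairs.foldl pvLoopA (ps, cur)).2 ≠ []) then
        (pairs.foldl pvLoopA (ps, cur)).1 ++ [(pairs.foldl pvLoopA (ps, cur)).2]
      else (pairs.foldl pvLoopA (ps, cur)).1) = ps ++ pvRun cur pairs := by
  induction pairs with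
  | nil =>
    intro ps cur
    simp only [List.foldl_nil, pvRun]
    split <;> simp_all
  | cons p rest ih =>
    intro ps cur
    rw [List.foldl_cons]
    by_cases h : pvNonblank p
    · have hA : pvLoopA (ps, cur) p = (ps, cur ++ [p]) := by simp [pvLoopA, h]
      rw [hA, pvRun, if_pos h]
      exact ih ps (cur ++ [p])
    · by_cases hc : cur = []
      · subst hc
        have hA : pvLoopA (ps, ([] : List (Int × String))) p = (ps, []) := by
          simp [pvLoopA, h]
        rw [hA, pvRun, if_neg h]
        simpa using ih ps []
      · have hA : pvLoopA (ps, cur) p = (ps ++ [cur], []) := by simp [pvLoopA, h, hc]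
        rw [hA, pvRun, if_neg h, if_pos hc, ih (ps ++ [cur]) []]
        simp

theorem pvRun_eq_groups (n : Nat) : ∀ pairs : List (Int × String), pairs.length ≤ n →
    (pvRun [] pairs = pvGroups pairs) ∧
    (∀ cur, cur ≠ [] →
      pvRun cur pairs = (cur ++ pairs.takeWhile pvNonblank) :: pvGroups (pairs.dropWhile pvNonblank)) := by
  induction n with
  | zero =>
    intro pairs hl
    have hnil : pairs = [] := List.eq_nil_of_length_eq_zero (Nat.le_zero.mp hl)
    subst hnil
    constructor
    · simp [pvRun, pvGroups]
    · intro cur hc; simp [pvRun, pvGroups, hc]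
  | succ n ih =>
    intro pairs hl
    cases pairs with
    | nil =>
      constructor
      · simp [pvRun, pvGroups]
      · intro cur hc; simp [pvRun, pvGroups, hc]
    | cons p rest =>
      simp only [List.length_cons, Nat.succ_le_succ_iff] at hl
      by_cases h : pvNonblank p
      · constructor
        · rw [pvRun, if_pos h, pvGroups.eq_def]
          simp only [h, if_true]
          rw [List.nil_append, (ih rest hl).2 [p] (by simp)]
          simp
        · intro cur hc
          rw [pvRun, if_pos h]
          rw [(ih rest hl).2 (cur ++ [p]) (by simp)]
          simp [h]
      · constructor
        · rw [pvRun, if_neg h, pvGroups.eq_def]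
          simp only [h]
          simp only [Bool.false_eq_true, if_false]; exact (ih rest hl).1
        · intro cur hc
          rw [pvRun, if_neg h, if_pos hc]
          rw [(ih rest hl).1]
          simp [h, pvGroups]

-- ---- B-side: pvSplit of the filtered enumeration equals pvGroups of the enumeration ----

-- every index occurring in `enumerate ls m` is ≥ m
theorem pvEnum_fst_ge (ls : List String) (m : Int) (p : Int × String)
    (hp : p ∈ PySem.List.enumerate ls m) : m ≤ p.1 := by
  rcases (PySem.List.mem_enumerate_iff _ _ _).1 hp with ⟨k, hk, rfl⟩
  simp

-- the run taken from the filtered tail is exactly the nonblank prefix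
theorem pvTakeRun_filter (ls : List String) (n : Int) :
    pvTakeRun n ((PySem.List.enumerate ls (n + 1)).filter pvNonblank)
      = ((PySem.List.enumerate ls (n + 1)).takeWhile pvNonblank,
         ((PySem.List.enumerate ls (n + 1)).dropWhile pvNonblank).filter pvNonblank) := by
  induction ls generalizing n with
  | nil => simp [pvTakeRun]
  | cons l rest ih =>
    rw [PySem.List.enumerate_cons]
    by_cases h : pvNonblank (n + 1, l)
    · rw [List.filter_cons_of_pos h, List.takeWhile_cons_of_pos h,
        List.dropWhile_cons_of_pos h, pvTakeRun, if_pos rfl, ih (n + 1)]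
    · rw [List.filter_cons_of_neg h, List.takeWhile_cons_of_neg h,
        List.dropWhile_cons_of_neg h, List.filter_cons_of_neg h]
      cases hF : (PySem.List.enumerate rest (n + 1 + 1)).filter pvNonblank with
      | nil => simp [pvTakeRun]
      | cons q qs =>
        have hq : q ∈ PySem.List.enumerate rest (n + 1 + 1) := by
          have : q ∈ (PySem.List.enumerate rest (n + 1 + 1)).filter pvNonblank := by
            rw [hF]; exact List.mem_cons_self
          exact List.mem_of_mem_filter this
        have hge := pvEnum_fst_ge rest (n + 1 + 1) q hq
        rw [pvTakeRun, if_neg (by omega)]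

-- dropping the nonblank prefix of an enumeration yields an enumeration again
theorem pvDropWhile_enum (ls : List String) (m : Int) :
    ∃ k, (PySem.List.enumerate ls m).dropWhile pvNonblank
      = PySem.List.enumerate (ls.drop k) (m + k) := by
  induction ls generalizing m with
  | nil => exact ⟨0, by simp⟩
  | cons l rest ih =>
    rw [PySem.List.enumerate_cons]
    by_cases h : pvNonblank (m, l)
    · rw [List.dropWhile_cons_of_pos h]
      obtain ⟨k, hk⟩ := ih (m + 1)
      refine ⟨k + 1, ?_⟩
      rw [hk]
      simp only [List.drop_succ_cons]
      congr 1
      push_cast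
      ring
    · rw [List.dropWhile_cons_of_neg h]
      exact ⟨0, by rw [← PySem.List.enumerate_cons]; simp⟩

theorem pvSplit_eq_groups (N : Nat) : ∀ (ls : List String) (n : Int), ls.length ≤ N →
    pvSplit ((PySem.List.enumerate ls n).filter pvNonblank)
      = pvGroups (PySem.List.enumerate ls n) := by
  induction N with
  | zero =>
    intro ls n hl
    have : ls = [] := List.eq_nil_of_length_eq_zero (Nat.le_zero.mp hl)
    subst this
    simp [pvSplit, pvGroups]
  | succ N ih =>
    intro ls n hl
    cases ls with
    | nil => simp [pvSplit, pvGroups]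
    | cons l rest =>
      simp only [List.length_cons, Nat.succ_le_succ_iff] at hl
      rw [PySem.List.enumerate_cons]
      by_cases h : pvNonblank (n, l)
      · rw [List.filter_cons_of_pos h, pvSplit, pvGroups.eq_def]
        simp only [h, if_true]
        rw [pvTakeRun_filter rest n]
        obtain ⟨k, hk⟩ := pvDropWhile_enum rest (n + 1)
        rw [hk, ih (rest.drop k) (n + 1 + k)
          (le_trans (by simp) hl)]
      · rw [List.filter_cons_of_neg h, pvGroups.eq_def]
        simp only [h]
        exact ih rest (n + 1) hl

-- ===== VERDICT (by name: the statement is the Claim_ definition above) =====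
theorem paragraphs_with_indices_py_spec : Claim_equal_paragraphs_with_indices_py := by
  intro lines _
  unfold Spec_paragraphs_with_indices_py paragraphs_with_indices_py paragraphs_with_indices_py_alt
  have h := pvRun_eq_foldl (PySem.List.enumerate lines) [] []
  simp only [List.nil_append] at h
  rw [h, (pvRun_eq_groups (PySem.List.enumerate lines).length _ (le_refl _)).1,
    pvSplit_eq_groups (PySem.List.enumerate lines |>.length) lines 0 (by simp)]
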